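-- pv_equiv track=rewrite | github.com/boostcamp-level1-27/algorithm | week1/Q3_Injae.py | solution
-- ===== SOURCE A (Python) =====
-- def solution(a):
--     left = float("inf")
--     right = float("inf")
--     answer_list = [0]*len(a)
--     for i in range(len(a)):
--         if left > a[i]:
--             left = a[i]
--             answer_list[i] = 1
--
--     for j in range(1,len(a)+1):
--         if right > a[-j]:
--             right = a[-j]
--             answer_list[-j] = 1
--
--
--     return sum(answer_list)
-- ===== SOURCE B (Python) =====
-- def solution(a):
--     n = len(a)
--     return sum(1 for i in range(n)
--                if all(a[j] > a[i] for j in range(i))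
--                or all(a[j] > a[i] for j in range(i + 1, n)))
-- ===== Notes on version B (the rewrite author's own statement) =====
-- stated objective: simpler
-- what changed: Replaces A's two stateful running-minimum passes over a shared 0/1 marking array by a direct stateless count: an index is counted iff its element is strictly below every earlier element or strictly below every later element, checked with per-index quantifiers.
import Mathlib
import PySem

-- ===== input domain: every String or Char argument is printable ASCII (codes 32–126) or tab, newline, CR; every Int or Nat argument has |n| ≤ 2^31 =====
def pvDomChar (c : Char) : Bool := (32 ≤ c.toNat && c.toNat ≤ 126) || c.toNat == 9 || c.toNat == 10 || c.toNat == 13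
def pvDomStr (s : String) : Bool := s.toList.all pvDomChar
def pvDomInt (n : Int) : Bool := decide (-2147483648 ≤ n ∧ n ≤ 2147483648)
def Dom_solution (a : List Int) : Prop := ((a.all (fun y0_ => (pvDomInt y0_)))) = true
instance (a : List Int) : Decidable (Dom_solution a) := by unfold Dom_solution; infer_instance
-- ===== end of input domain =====

-- B replaces A's two stateful running-minimum passes over a shared 0/1 marking array by a
-- direct stateless quantifier count (strictly below all earlier, or all later, elements);
-- objective: simpler (B is O(n^2), not faster).

-- ===== PORT A =====
-- `float("inf")` is modelled by `Option Int` with `none` = inf: every element of the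
-- (integer) list compares `<` inf, exactly as in Python.  `pyLtInf x m` is Python's `m > x`.
def pyLtInf (x : Int) (m : Option Int) : Bool :=
  match m with
  | none => true
  | some v => x < v

-- body of A's first `for i in range(len(a))` loop (a[i] is in range, so getD is exact)
def stepL (a : List Int) (s : Option Int × List Int) (i : Nat) : Option Int × List Int :=
  if pyLtInf (a.getD i 0) s.1 then (some (a.getD i 0), s.2.set i 1) else s

-- body of A's second loop; Python's a[-j] with 1 ≤ j ≤ n is a[n-j]
def stepR (a : List Int) (n : Nat) (s : Option Int × List Int) (j : Nat) : Option Int × List Int :=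
  if pyLtInf (a.getD (n - j) 0) s.1 then (some (a.getD (n - j) 0), s.2.set (n - j) 1) else s

def solution (a : List Int) : Int :=
  let n := a.length
  let s1 := (List.range n).foldl (stepL a) (none, List.replicate n 0)
  let s2 := (List.range' 1 n).foldl (stepR a n) (none, s1.2)
  s2.2.sum

-- ===== PORT B =====
-- `sum(1 for i in range(n) if all(a[j] > a[i] for j in range(i))
--                          or all(a[j] > a[i] for j in range(i+1, n)))`
-- ported as a fold over range(n) adding the 0/1 indicator of the two `all` checks
def solution_alt (a : List Int) : Int :=
  let n := a.length
  (List.range n).foldl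
    (fun s i =>
      s + (if (List.range i).all (fun j => a.getD j 0 > a.getD i 0)
            || (List.range' (i + 1) (n - (i + 1))).all (fun j => a.getD j 0 > a.getD i 0)
           then (1 : Int) else 0)) 0

-- ===== PRECONDITION & SPEC =====
def Spec_solution (a : List Int) (out : Int) : Prop := out = solution_alt a
instance (a : List Int) (out : Int) : Decidable (Spec_solution a out) := by unfold Spec_solution; infer_instance

-- ===== CLAIM (what is proved, stated in full; the proofs are below) =====
def Claim_equal_solution : Prop := ∀ (a : List Int), Dom_solution a → Spec_solution a (solution a)

-- ===== LEMMAS AND PROOFS =====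

-- proof-layer characterizations: position i is a strict prefix / suffix record
def leftRec (a : List Int) (i : Nat) : Bool :=
  (List.range i).all (fun j => a.getD j 0 > a.getD i 0)

def rightRec (a : List Int) (i : Nat) : Bool :=
  (List.range' (i + 1) (a.length - (i + 1))).all (fun j => a.getD j 0 > a.getD i 0)

-- invariant for A's first loop
lemma loop1_inv (a : List Int) (k : Nat) (hk : k ≤ a.length) :
    (∀ x : Int, pyLtInf x (((List.range k).foldl (stepL a) (none, List.replicate a.length 0)).1)
        = (List.range k).all (fun j => a.getD j 0 > x))
    ∧ ((List.range k).foldl (stepL a) (none, List.replicate a.length 0)).2.length = a.length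
    ∧ (∀ j : Nat, ((List.range k).foldl (stepL a) (none, List.replicate a.length 0)).2.getD j 0
        = if j < k ∧ leftRec a j then (1:Int) else 0) := by
  induction k with
  | zero =>
      refine ⟨fun x => by simp [pyLtInf], by simp, fun j => by simp⟩
  | succ k ih =>
      have hk' : k ≤ a.length := Nat.le_of_succ_le hk
      obtain ⟨ih1, ih2, ih3⟩ := ih hk'
      set s := (List.range k).foldl (stepL a) (none, List.replicate a.length 0) with hs
      have hfold : (List.range (k+1)).foldl (stepL a) (none, List.replicate a.length 0)
          = stepL a s k := by
        rw [List.range_succ, List.foldl_append]; rfl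
      have hcond : pyLtInf (a.getD k 0) s.1 = leftRec a k := by
        rw [ih1]; rfl
      rw [hfold]
      by_cases hc : pyLtInf (a.getD k 0) s.1 = true
      · -- a[k] is a new strict minimum
        have hrec : leftRec a k = true := hcond ▸ hc
        have hall : ∀ j ∈ List.range k, a.getD j 0 > a.getD k 0 := by
          have := hrec
          simp [leftRec, List.all_eq_true] at this
          intro j hj; exact this j (List.mem_range.mp hj)
        have hstep : stepL a s k = (some (a.getD k 0), s.2.set k 1) := by
          unfold stepL; rw [hc]; simp
        rw [hstep]
        refine ⟨?_, by simp [ih2], ?_⟩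
        · intro x
          rw [Bool.eq_iff_iff]
          simp only [pyLtInf, List.all_eq_true, List.mem_range, decide_eq_true_eq]
          constructor
          · intro hx j hj
            rcases Nat.lt_succ_iff_lt_or_eq.mp hj with h | h
            · have := hall j (List.mem_range.mpr h); omega
            · subst h; omega
          · intro h; exact h k (Nat.lt_succ_self k)
        · intro j
          have hgd : (s.2.set k 1).getD j 0 = if k = j then (1:Int) else s.2.getD j 0 := by
            by_cases h : k = j
            · subst h; simp [List.getD, ih2, Nat.lt_of_succ_le hk]
            · simp [List.getD, h]
          rw [hgd]
          by_cases h : k = j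
          · subst h; simp [hrec]
          · rw [if_neg h, ih3 j]
            have hcnd : (j < k + 1 ∧ leftRec a j = true) ↔ (j < k ∧ leftRec a j = true) := by
              constructor
              · rintro ⟨h1, h2⟩; exact ⟨by omega, h2⟩
              · rintro ⟨h1, h2⟩; exact ⟨by omega, h2⟩
            rw [if_congr hcnd rfl rfl]
      · -- a[k] is not a new minimum: min unchanged, list unchanged
        have hrec : leftRec a k = false := by
          rw [← hcond]; simpa using hc
        have hstep : stepL a s k = s := by
          unfold stepL
          rw [if_neg (by simpa using hc)]
        rw [hstep]
        -- from hc: some earlier element is ≤ a[k]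
        have hex : ∃ j0, j0 < k ∧ ¬ (a.getD j0 0 > a.getD k 0) := by
          have := hc
          rw [ih1] at this
          simp [List.all_eq_true] at this
          obtain ⟨j0, hj0, hle⟩ := this
          exact ⟨j0, hj0, by simp only [List.getD]; omega⟩
        refine ⟨?_, ih2, ?_⟩
        · intro x
          rw [ih1, Bool.eq_iff_iff]
          simp only [List.all_eq_true, List.mem_range, decide_eq_true_eq]
          constructor
          · intro h j hj
            rcases Nat.lt_succ_iff_lt_or_eq.mp hj with h' | h'
            · exact h j h'
            · subst h'
              obtain ⟨j0, hj0, hle⟩ := hex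
              have := h j0 hj0; omega
          · intro h j hj; exact h j (Nat.lt_succ_of_lt hj)
        · intro j
          rw [ih3 j]
          by_cases h : j = k
          · subst h; simp [hrec]
          · have hcnd : (j < k + 1 ∧ leftRec a j = true) ↔ (j < k ∧ leftRec a j = true) := by
              constructor
              · rintro ⟨h1, h2⟩; exact ⟨by omega, h2⟩
              · rintro ⟨h1, h2⟩; exact ⟨by omega, h2⟩
            rw [if_congr hcnd rfl rfl]

-- invariant for A's second loop (k steps processed: indices n-1 down to n-k marked)
lemma loop2_inv (a l : List Int) (hl : l.length = a.length) (k : Nat) (hk : k ≤ a.length) :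
    (∀ x : Int, pyLtInf x (((List.range' 1 k).foldl (stepR a a.length) (none, l)).1)
        = (List.range' (a.length - k) k).all (fun j => a.getD j 0 > x))
    ∧ ((List.range' 1 k).foldl (stepR a a.length) (none, l)).2.length = a.length
    ∧ (∀ j : Nat, ((List.range' 1 k).foldl (stepR a a.length) (none, l)).2.getD j 0
        = if a.length - k ≤ j ∧ j < a.length ∧ rightRec a j then (1:Int) else l.getD j 0) := by
  induction k with
  | zero =>
      refine ⟨fun x => by simp [pyLtInf], by simp [hl], fun j => by
        simp
        intro h1 h2 h3; omega⟩
  | succ k ih =>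
      have hk' : k ≤ a.length := Nat.le_of_succ_le hk
      obtain ⟨ih1, ih2, ih3⟩ := ih hk'
      set s := (List.range' 1 k).foldl (stepR a a.length) (none, l) with hs
      set n := a.length with hn
      set i := n - (k+1) with hi
      have hik : i + 1 = n - k := by omega
      have hin : i < n := by omega
      have hfold : (List.range' 1 (k+1)).foldl (stepR a n) (none, l) = stepR a n s (1+k) := by
        have : List.range' 1 (k+1) = List.range' 1 k ++ [1 + 1*k] := List.range'_concat ..
        rw [this, List.foldl_append]
        simp only [Nat.one_mul, List.foldl_cons, List.foldl_nil]
        rw [← hs]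
      have hidx : n - (1+k) = i := by omega
      have hcond : pyLtInf (a.getD i 0) s.1 = rightRec a i := by
        rw [ih1]
        simp [rightRec, ← hn]
        rw [hik, Nat.sub_sub_self hk']
      have hrangenew : List.range' i (k+1) = i :: List.range' (i+1) k := List.range'_succ ..
      rw [hfold]
      by_cases hc : pyLtInf (a.getD i 0) s.1 = true
      · have hrec : rightRec a i = true := hcond ▸ hc
        have hall : ∀ j ∈ List.range' (i+1) k, a.getD j 0 > a.getD i 0 := by
          have := hc
          rw [ih1] at this
          simp [List.all_eq_true] at this
          intro j hj
          rw [List.mem_range'_1] at hj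
          exact this j (by omega) (by omega)
        have hstep : stepR a n s (1+k) = (some (a.getD i 0), s.2.set i 1) := by
          unfold stepR; rw [hidx, hc]; simp
        rw [hstep]
        refine ⟨?_, by simp [ih2], ?_⟩
        · intro x
          rw [Bool.eq_iff_iff]
          simp only [pyLtInf, hrangenew, List.all_cons, List.all_eq_true, Bool.and_eq_true,
            decide_eq_true_eq, List.mem_range'_1]
          constructor
          · intro hx
            refine ⟨by omega, ?_⟩
            intro j hj
            have := hall j (by rw [List.mem_range'_1]; omega)
            omega
          · intro ⟨h1, _⟩; omega
        · intro j
          have hgd : (s.2.set i 1).getD j 0 = if i = j then (1:Int) else s.2.getD j 0 := by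
            by_cases h : i = j
            · subst h; simp [List.getD, ih2, hin]
            · simp [List.getD, h]
          rw [hgd]
          by_cases h : i = j
          · subst h; rw [if_pos rfl, if_pos ⟨by omega, hin, hrec⟩]
          · rw [if_neg h, ih3 j]
            by_cases h2 : n - k ≤ j ∧ j < n ∧ rightRec a j = true
            · rw [if_pos h2, if_pos ⟨by omega, h2.2.1, h2.2.2⟩]
            · have hno : ¬ (n - (k+1) ≤ j ∧ j < n ∧ rightRec a j = true) := by
                rintro ⟨hx1, hx2, hx3⟩
                exact h2 ⟨by omega, hx2, hx3⟩
              rw [if_neg h2, if_neg hno]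
      · have hrec : rightRec a i = false := by
          rw [← hcond]; simpa using hc
        have hstep : stepR a n s (1+k) = s := by
          unfold stepR
          rw [hidx, if_neg (by simpa using hc)]
        rw [hstep]
        have hex : ∃ j0, i+1 ≤ j0 ∧ j0 < i+1+k ∧ ¬ (a.getD j0 0 > a.getD i 0) := by
          have := hc
          rw [ih1] at this
          simp [List.all_eq_true] at this
          obtain ⟨j0, hj1, hj2, hle⟩ := this
          exact ⟨j0, by omega, by omega, by simp only [List.getD]; omega⟩
        refine ⟨?_, ih2, ?_⟩
        · intro x
          rw [ih1]
          have hr2 : List.range' (i+1) k = List.range' (n-k) k := by rw [hik]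
          rw [Bool.eq_iff_iff]
          simp only [hrangenew, List.all_cons, Bool.and_eq_true, List.all_eq_true,
            List.mem_range'_1, decide_eq_true_eq, hr2]
          constructor
          · intro h
            obtain ⟨j0, hj1, hj2, hle⟩ := hex
            refine ⟨?_, h⟩
            have h0 := h j0 ⟨by omega, by omega⟩
            omega
          · exact fun h => h.2
        · intro j
          rw [ih3 j]
          by_cases h2 : n - k ≤ j ∧ j < n ∧ rightRec a j = true
          · rw [if_pos h2, if_pos ⟨by omega, h2.2.1, h2.2.2⟩]
          · have hno : ¬ (n - (k+1) ≤ j ∧ j < n ∧ rightRec a j = true) := by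
              rintro ⟨hx1, hx2, hx3⟩
              rcases Nat.lt_or_ge j (n-k) with hlt | hge
              · have hji : j = i := by omega
                rw [hji, hrec] at hx3; exact Bool.false_ne_true hx3
              · exact h2 ⟨hge, hx2, hx3⟩
            rw [if_neg h2, if_neg hno]

-- sum of a list through its positions
lemma sum_eq_indexed : ∀ (l : List Int),
    l.sum = ((List.range l.length).map (fun j => l.getD j 0)).sum := by
  intro l
  induction l with
  | nil => simp
  | cons x t ih =>
      simp only [List.length_cons, List.range_succ_eq_map, List.map_cons, List.map_map,
        List.sum_cons]
      have hmap : List.map ((fun j => (x :: t).getD j 0) ∘ Nat.succ) (List.range t.length)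
          = List.map (fun j => t.getD j 0) (List.range t.length) := by
        apply List.map_congr_left
        intro j _
        rfl
      rw [hmap, ← ih]
      simp [List.getD]

-- sum of an indicator map is a count
lemma indicator_sum (p : Nat → Bool) : ∀ (L : List Nat),
    ((L.map (fun j => if p j then (1:Int) else 0)).sum = (L.countP p : Nat)) := by
  intro L
  induction L with
  | nil => simp
  | cons x t ih =>
      simp only [List.map_cons, List.sum_cons, List.countP_cons, ih]
      by_cases h : p x = true
      · simp [h]; ring
      · simp [h]

-- A returns the number of record positions
lemma sol_eq_count (a : List Int) :
    solution a = (((List.range a.length).countP (fun i => leftRec a i || rightRec a i) : Nat) : Int) := by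
  unfold solution
  simp only []
  set n := a.length with hn
  obtain ⟨_, h1len, h1⟩ := loop1_inv a n (le_refl _)
  set s1 := (List.range n).foldl (stepL a) (none, List.replicate n 0) with hs1
  obtain ⟨_, h2len, h2⟩ := loop2_inv a s1.2 h1len n (le_refl _)
  set s2 := (List.range' 1 n).foldl (stepR a n) (none, s1.2) with hs2
  have hfin : ∀ j, j < n → s2.2.getD j 0
      = if (leftRec a j || rightRec a j) then (1:Int) else 0 := by
    intro j hj
    rw [h2 j, h1 j]
    by_cases hr : rightRec a j = true
    · simp [hr, hj]; omega
    · simp [hr, hj]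
  rw [sum_eq_indexed s2.2, h2len]
  have : (List.range n).map (fun j => s2.2.getD j 0)
      = (List.range n).map (fun j => if (leftRec a j || rightRec a j) then (1:Int) else 0) := by
    apply List.map_congr_left
    intro j hj
    exact hfin j (List.mem_range.mp hj)
  rw [this, indicator_sum]

-- B-side: a fold adding a 0/1 indicator is a count
lemma foldl_indicator (p : Nat → Bool) : ∀ (L : List Nat) (s : Int),
    L.foldl (fun s i => s + if p i then (1:Int) else 0) s = s + (L.countP p : Nat) := by
  intro L
  induction L with
  | nil => intro s; simp
  | cons x t ih =>
      intro s
      simp only [List.foldl_cons, List.countP_cons, ih]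
      by_cases h : p x = true
      · simp [h]; ring
      · simp [h]

-- B returns the same count
lemma alt_eq_count (a : List Int) :
    solution_alt a = (((List.range a.length).countP (fun i => leftRec a i || rightRec a i) : Nat) : Int) := by
  show (List.range a.length).foldl
      (fun s i => s + if leftRec a i || rightRec a i then (1:Int) else 0) 0 = _
  rw [foldl_indicator]
  simp

-- ===== VERDICT (by name: the statement is the Claim_ definition above) =====
theorem solution_spec : Claim_equal_solution := by
  intro a _
  unfold Spec_solution
  rw [sol_eq_count, alt_eq_count]
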